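-- pv_equiv track=rewrite | github.com/nhuray/mongo-replication | src/mongo_replication/engine/pii/presidio_anonymizer.py | _redact_ssn
-- ===== SOURCE A (Python) =====
-- def _redact_ssn(ssn: str) -> str:
--     """Redact SSN preserving format: 123-45-6789 -> ***-**-6789"""
--     # Replace digits but preserve separators
--     result = ""
--     parts = ssn.split("-")
--     if len(parts) == 3:
--         # Standard XXX-XX-XXXX format
--         # Mask first two groups, show last 4
--         result = "***-**-" + parts[2]
--     else:
--         # Non-standard format, use generic masking
--         result = ""
--         for char in ssn:
--             if char.isdigit():
--                 result += "*"
--             else: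
--                 result += char
--         # Try to preserve last 4 digits
--         digits_only = [i for i, c in enumerate(ssn) if c.isdigit()]
--         if len(digits_only) >= 4:
--             for i in digits_only[-4:]:
--                 result = result[:i] + ssn[i] + result[i+1:]
--
--     return result
-- ===== SOURCE B (Python) =====
-- def _redact_ssn(ssn: str) -> str:
--     parts = ssn.split("-")
--     if len(parts) == 3:
--         return "***-**-" + parts[2]
--     digit_idx = [i for i, c in enumerate(ssn) if c.isdigit()]
--     keep = set(digit_idx[-4:]) if len(digit_idx) >= 4 else set()
--     return "".join(
--         "*" if c.isdigit() and i not in keep else c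
--         for i, c in enumerate(ssn)
--     )
-- ===== Notes on version B (the rewrite author's own statement) =====
-- stated objective: simpler
-- what changed: In the non-standard branch, instead of masking every digit and then patching the last four back in with slice surgery (two passes plus string rebuilding per restored digit), B precomputes the keep-set of the last four digit positions and emits each character in one single decision-per-character pass.
import Mathlib
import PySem

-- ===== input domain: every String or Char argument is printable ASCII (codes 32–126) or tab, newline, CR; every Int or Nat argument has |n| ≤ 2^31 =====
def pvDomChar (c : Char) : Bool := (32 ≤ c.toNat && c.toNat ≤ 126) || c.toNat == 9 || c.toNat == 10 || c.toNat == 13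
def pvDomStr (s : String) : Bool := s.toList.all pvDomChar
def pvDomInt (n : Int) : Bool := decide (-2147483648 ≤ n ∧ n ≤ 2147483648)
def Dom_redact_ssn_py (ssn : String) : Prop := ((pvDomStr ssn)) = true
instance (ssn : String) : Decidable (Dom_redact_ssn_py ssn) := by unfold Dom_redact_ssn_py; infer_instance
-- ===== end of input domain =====

-- B replaces A's mask-everything-then-patch-back-the-last-four-digits slice surgery with a
-- precomputed keep-set and one decision-per-character pass (objective: simpler).

-- ===== PORT A =====
-- literal transliteration of _redact_ssn; the patch loop's `result[:i] + ssn[i] + result[i+1:]`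
-- is slice/slice/pyGet?; pyGet? is always `some` here since i comes from enumerate(ssn).
def redact_ssn_py (ssn : String) : String :=
  let cs := ssn.toList
  let parts := PySem.Chars.splitOn cs ['-']
  if parts.length = 3 then
    String.ofList ("***-**-".toList ++ PySem.List.pyGetD parts 2 [])
  else
    let result := cs.foldl (fun acc c => if PySem.Chars.isdigit c then acc ++ ['*'] else acc ++ [c]) []
    let digits_only := ((PySem.List.enumerate cs 0).filter (fun p => PySem.Chars.isdigit p.2)).map (·.1)
    let result :=
      if 4 ≤ digits_only.length then
        (PySem.List.slice digits_only (some (-4)) none).foldl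
          (fun res i =>
            PySem.List.slice res none (some i) ++ (PySem.List.pyGet? cs i).toList
              ++ PySem.List.slice res (some (i + 1)) none)
          result
      else result
    String.ofList result

-- ===== PORT B =====
def redact_ssn_py_alt (ssn : String) : String :=
  let cs := ssn.toList
  let parts := PySem.Chars.splitOn cs ['-']
  if parts.length = 3 then
    String.ofList ("***-**-".toList ++ PySem.List.pyGetD parts 2 [])
  else
    let digit_idx := ((PySem.List.enumerate cs 0).filter (fun p => PySem.Chars.isdigit p.2)).map (·.1)
    let keep : PySem.Set Int :=
      if 4 ≤ digit_idx.length then PySem.Set.ofList (PySem.List.slice digit_idx (some (-4)) none)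
      else PySem.Set.ofList []
    String.ofList ((PySem.List.enumerate cs 0).map
      (fun p => if PySem.Chars.isdigit p.2 && !(PySem.Set.contains keep p.1) then '*' else p.2))

-- ===== PRECONDITION & SPEC =====
def Spec_redact_ssn_py (ssn : String) (out : String) : Prop := out = redact_ssn_py_alt ssn
instance (ssn : String) (out : String) : Decidable (Spec_redact_ssn_py ssn out) := by unfold Spec_redact_ssn_py; infer_instance

-- ===== CLAIM (what is proved, stated in full; the proofs are below) =====
def Claim_equal_redact_ssn_py : Prop := ∀ (ssn : String), Dom_redact_ssn_py ssn → Spec_redact_ssn_py ssn (redact_ssn_py ssn)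

-- ===== LEMMAS AND PROOFS =====

theorem mask_foldl (cs : List Char) (acc : List Char) :
    cs.foldl (fun acc c => if PySem.Chars.isdigit c then acc ++ ['*'] else acc ++ [c]) acc
      = acc ++ cs.map (fun c => if PySem.Chars.isdigit c then '*' else c) := by
  induction cs generalizing acc with
  | nil => simp
  | cons c cs ih =>
    simp only [List.foldl_cons, List.map_cons, ih]
    by_cases h : PySem.Chars.isdigit c <;> simp [h]

theorem mem_digits (cs : List Char) (i : Int)
    (h : i ∈ ((PySem.List.enumerate cs 0).filter (fun p => PySem.Chars.isdigit p.2)).map (·.1)) :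
    ∃ k : Nat, i = (k : Int) ∧ ∃ hk : k < cs.length, PySem.Chars.isdigit cs[k] := by
  simp only [List.mem_map, List.mem_filter] at h
  obtain ⟨p, ⟨hp, hd⟩, rfl⟩ := h
  rw [PySem.List.mem_enumerate_iff] at hp
  obtain ⟨k, hk, rfl⟩ := hp
  exact ⟨k, by simp, hk, by simpa using hd⟩

theorem patch_eq_set (cs res : List Char) (k : Nat) (hk : k < cs.length)
    (hlen : res.length = cs.length) :
    PySem.List.slice res none (some (k : Int)) ++ (PySem.List.pyGet? cs (k : Int)).toList
        ++ PySem.List.slice res (some ((k : Int) + 1)) none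
      = res.set k cs[k] := by
  have h1 : PySem.List.slice res none (some (k : Int)) = res.take k :=
    PySem.List.slice_to_natCast res k
  have h2 : PySem.List.slice res (some ((k : Int) + 1)) none = res.drop (k + 1) := by
    have := PySem.List.slice_from_natCast res (k + 1)
    simpa using this
  have h3 : PySem.List.pyGet? cs (k : Int) = some cs[k] := by
    simp [PySem.List.pyGet?_natCast, List.getElem?_eq_getElem hk]
  rw [h1, h2, h3]
  simp [List.set_eq_take_append_cons_drop, hk, hlen]

theorem patch_foldl (cs : List Char) (L : List Int) (res : List Char)
    (hlen : res.length = cs.length)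
    (hL : ∀ i ∈ L, ∃ k : Nat, i = (k : Int) ∧ k < cs.length) (j : Nat) :
    (L.foldl
      (fun res i =>
        PySem.List.slice res none (some i) ++ (PySem.List.pyGet? cs i).toList
          ++ PySem.List.slice res (some (i + 1)) none)
      res)[j]? = if (j : Int) ∈ L then cs[j]? else res[j]? := by
  induction L generalizing res with
  | nil => simp
  | cons i L ih =>
    obtain ⟨k, rfl, hk⟩ := hL i (List.mem_cons_self ..)
    simp only [List.foldl_cons]
    rw [patch_eq_set cs res k hk hlen]
    rw [ih (res.set k cs[k]) (by simp [hlen]) (fun i hi => hL i (List.mem_cons_of_mem _ hi))]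
    by_cases hmem : (j : Int) ∈ L
    · simp [hmem]
    · by_cases hjk : j = k
      · subst hjk
        simp [hmem, hlen, hk]
      · have hne : ((j : Int) ≠ (k : Int)) := by exact_mod_cast hjk
        simp [hmem, hne, Ne.symm hjk]

theorem redact_ssn_py_eq (ssn : String) : redact_ssn_py ssn = redact_ssn_py_alt ssn := by
  unfold redact_ssn_py redact_ssn_py_alt
  set cs := ssn.toList with hcs
  by_cases h3 : (PySem.Chars.splitOn cs ['-']).length = 3
  · simp [h3]
  · simp only [h3, if_false]
    congr 1
    set D := ((PySem.List.enumerate cs 0).filter (fun p => PySem.Chars.isdigit p.2)).map (·.1) with hD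
    set mask := cs.map (fun c => if PySem.Chars.isdigit c then '*' else c) with hmask
    have hmlen : mask.length = cs.length := by simp [hmask]
    rw [mask_foldl cs [], List.nil_append, ← hmask]
    have hDmem : ∀ i ∈ D, ∃ k : Nat, i = (k : Int) ∧ ∃ hk : k < cs.length, PySem.Chars.isdigit cs[k] :=
      fun i hi => mem_digits cs i hi
    by_cases h4 : 4 ≤ D.length
    · simp only [h4, if_true]
      set L := PySem.List.slice D (some (-4)) none with hL
      have hLmem : ∀ i ∈ L, i ∈ D := fun i hi => PySem.List.mem_of_mem_slice D (some (-4)) none hi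
      apply List.ext_getElem?
      intro j
      rw [patch_foldl cs L mask hmlen
        (fun i hi => by obtain ⟨k, hk, hklt, _⟩ := hDmem i (hLmem i hi); exact ⟨k, hk, hklt⟩) j]
      simp only [List.getElem?_map, PySem.List.getElem?_enumerate]
      rcases hcj : cs[j]? with _ | c
      · have : ¬ (j : Int) ∈ L := by
          intro hmem
          obtain ⟨k, hk, hklt, _⟩ := hDmem _ (hLmem _ hmem)
          have : j = k := by exact_mod_cast hk
          subst this
          simp [List.getElem?_eq_getElem hklt] at hcj
        simp [this, hcj, hmask, List.getElem?_map]
      · obtain ⟨hjlt, hc⟩ := List.getElem?_eq_some_iff.1 hcj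
        by_cases hd : PySem.Chars.isdigit c
        · by_cases hmem : (j : Int) ∈ L
          · simp [hmem, hd]
          · have hcf : PySem.Set.contains (PySem.Set.ofList L) ((0:Int) + (j : Nat)) = false := by
              by_contra h
              exact hmem ((PySem.Set.mem_ofList _ _).1 ((PySem.Set.contains_iff _ _).1 (by simpa using h)))
            simp [hmem, hcj, hd, hmask, List.getElem?_map]
        · have hmem : ¬ (j : Int) ∈ L := by
            intro hmem
            obtain ⟨k, hk, hklt, hkd⟩ := hDmem _ (hLmem _ hmem)
            have hjk : j = k := by exact_mod_cast hk
            subst hjk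
            exact hd (hc ▸ hkd)
          simp [hmem, hcj, hd, hmask, List.getElem?_map]
    · simp only [h4, if_false]
      apply List.ext_getElem?
      intro j
      simp only [hmask, List.getElem?_map, PySem.List.getElem?_enumerate]
      rcases hcj : cs[j]? with _ | c
      · simp
      · by_cases hd : PySem.Chars.isdigit c <;> simp [hd, PySem.Set.ofList]

-- ===== VERDICT (by name: the statement is the Claim_ definition above) =====
theorem redact_ssn_py_spec : Claim_equal_redact_ssn_py := by
  intro ssn _
  unfold Spec_redact_ssn_py
  exact redact_ssn_py_eq ssn
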